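-- pv_equiv track=rewrite | github.com/thomasherzog/AdventOfFPGA2025 | src/day01/tb/day01_stimuli_gen.py | gen_expected_outputs_p1
-- ===== SOURCE A (Python) =====
-- def gen_expected_outputs_p1(stimuli):
--     outputs = []
--     dial = 50
--     zeros_accum = 0
--     for direction, amount in stimuli:
--         if direction == 'L':
--             dial = (dial - amount) % 100
--         elif direction == 'R':
--             dial = (dial + amount) % 100
--         if dial == 0:
--             zeros_accum += 1
--         outputs.append(zeros_accum)
--     return outputs
-- ===== SOURCE B (Python) =====
-- def gen_expected_outputs_p1(stimuli):
--     # pass 1: raw signed prefix sums (no modular state); record the indices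
--     # where the dial, i.e. (50 + net displacement) % 100, hits 0
--     s = 50
--     hits = []
--     for i, (direction, amount) in enumerate(stimuli):
--         s += -amount if direction == 'L' else (amount if direction == 'R' else 0)
--         if s % 100 == 0:
--             hits.append(i)
--     # pass 2: run-length construction: output is constant between zero hits
--     out = []
--     k = 0
--     prev = 0
--     for h in hits:
--         out.extend([k] * (h - prev))
--         k += 1
--         out.append(k)
--         prev = h + 1
--     out.extend([k] * (len(stimuli) - prev))
--     return out
-- ===== Notes on version B (the rewrite author's own statement) =====
-- stated objective: alternative
-- what changed: B drops A's per-step modular dial state and running counter: it tracks a raw signed prefix sum (mod applied only at the zero test, correct because (x%100±a)%100=(x±a)%100), records the indices of zero hits, and then builds the output by run-length filling constant segments between consecutive hit indices.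
import Mathlib
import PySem

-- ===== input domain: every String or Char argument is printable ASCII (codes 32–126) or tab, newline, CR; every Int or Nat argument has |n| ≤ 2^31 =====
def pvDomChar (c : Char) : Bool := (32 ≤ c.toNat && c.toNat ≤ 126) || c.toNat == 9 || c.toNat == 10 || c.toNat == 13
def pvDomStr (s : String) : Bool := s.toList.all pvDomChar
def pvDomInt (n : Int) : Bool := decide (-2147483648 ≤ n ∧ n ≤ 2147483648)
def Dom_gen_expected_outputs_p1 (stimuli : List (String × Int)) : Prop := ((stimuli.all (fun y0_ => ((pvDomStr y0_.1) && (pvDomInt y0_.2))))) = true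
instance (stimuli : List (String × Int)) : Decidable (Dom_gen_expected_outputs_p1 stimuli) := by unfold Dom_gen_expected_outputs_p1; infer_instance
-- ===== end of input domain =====

-- B replaces A's per-step modular dial + running counter with raw signed prefix sums, zero-hit indices and a run-length fill; objective: alternative algorithm, same cost.


-- ===== PORT A =====
-- one fused loop: state (outputs, dial, zeros_accum), appending per step
def pvStepA (st : List Int × Int × Int) (p : String × Int) : List Int × Int × Int :=
  let (outputs, dial, zeros) := st
  let dial' :=
    if p.1 == "L" then PySem.Int.mod (dial - p.2) 100
    else if p.1 == "R" then PySem.Int.mod (dial + p.2) 100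
    else dial
  let zeros' := if dial' == 0 then zeros + 1 else zeros
  (outputs ++ [zeros'], dial', zeros')

def gen_expected_outputs_p1 (stimuli : List (String × Int)) : List Int :=
  (stimuli.foldl pvStepA ([], 50, 0)).1

-- ===== PORT B =====
-- pass 1 of Source B: raw signed prefix sum s, recording indices where s % 100 == 0
def pvHits (s : Int) (i : Int) : List (String × Int) → List Int
  | [] => []
  | (direction, amount) :: rest =>
    let s' := s + (if direction == "L" then -amount else if direction == "R" then amount else 0)
    if PySem.Int.mod s' 100 == 0 then i :: pvHits s' (i + 1) rest
    else pvHits s' (i + 1) rest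

-- pass 2 of Source B: loop over hits extending runs [k]*(h-prev) then appending k+1; final fill
def pvRuns (n : Int) : List Int → Int → Int → List Int
  | [], k, prev => List.replicate (n - prev).toNat k
  | h :: hs, k, prev => List.replicate (h - prev).toNat k ++ (k + 1) :: pvRuns n hs (k + 1) (h + 1)

def gen_expected_outputs_p1_alt (stimuli : List (String × Int)) : List Int :=
  pvRuns (stimuli.length : Int) (pvHits 50 0 stimuli) 0 0

-- ===== PRECONDITION & SPEC =====
def Spec_gen_expected_outputs_p1 (stimuli : List (String × Int)) (out : List Int) : Prop := out = gen_expected_outputs_p1_alt stimuli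
instance (stimuli : List (String × Int)) (out : List Int) : Decidable (Spec_gen_expected_outputs_p1 stimuli out) := by unfold Spec_gen_expected_outputs_p1; infer_instance

-- ===== CLAIM (what is proved, stated in full; the proofs are below) =====
def Claim_equal_gen_expected_outputs_p1 : Prop := ∀ (stimuli : List (String × Int)), Dom_gen_expected_outputs_p1 stimuli → Spec_gen_expected_outputs_p1 stimuli (gen_expected_outputs_p1 stimuli)

-- ===== LEMMAS AND PROOFS =====
-- intermediate: A's per-step counter list, stated over the raw prefix sum
def pvListZ (s z : Int) : List (String × Int) → List Int
  | [] => []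
  | (d, a) :: rest =>
    let s' := s + (if d == "L" then -a else if d == "R" then a else 0)
    let z' := if PySem.Int.mod s' 100 == 0 then z + 1 else z
    z' :: pvListZ s' z' rest

theorem pvStepA_char (out : List Int) (s z : Int) (dir : String) (amt : Int) :
    pvStepA (out, PySem.Int.mod s 100, z) (dir, amt) =
      ((out ++ [if PySem.Int.mod (s + (if dir == "L" then -amt else if dir == "R" then amt else 0)) 100 == 0 then z + 1 else z]),
       PySem.Int.mod (s + (if dir == "L" then -amt else if dir == "R" then amt else 0)) 100,
       (if PySem.Int.mod (s + (if dir == "L" then -amt else if dir == "R" then amt else 0)) 100 == 0 then z + 1 else z)) := by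
  by_cases hL : dir == "L"
  · simp [pvStepA, hL, sub_eq_add_neg]
  · by_cases hR : dir == "R"
    · simp [pvStepA, hL, hR]
    · simp [pvStepA, hL, hR]

theorem pvFoldA_eq (l : List (String × Int)) : ∀ (out : List Int) (s z : Int),
    (l.foldl pvStepA (out, PySem.Int.mod s 100, z)).1 = out ++ pvListZ s z l := by
  induction l with
  | nil => intro out s z; simp [pvListZ]
  | cons p rest ih =>
    intro out s z
    obtain ⟨dir, amt⟩ := p
    rw [List.foldl_cons, pvStepA_char, ih, pvListZ]
    simp

theorem pvHits_lb (l : List (String × Int)) : ∀ (s i h : Int),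
    h ∈ pvHits s i l → i ≤ h := by
  induction l with
  | nil => intro s i h hh; simp [pvHits] at hh
  | cons p rest ih =>
    intro s i h hh
    obtain ⟨d, a⟩ := p
    simp only [pvHits] at hh
    split_ifs at hh
    all_goals
      first
      | · rcases List.mem_cons.mp hh with rfl | hh'
          · exact le_refl _
          · linarith [ih _ _ _ hh']
      | linarith [ih _ _ _ hh]

theorem pvRuns_shift (hs : List Int) (n k prev : Int)
    (hlb : ∀ h ∈ hs, prev + 1 ≤ h) (hn : prev + 1 ≤ n) :
    pvRuns n hs k prev = k :: pvRuns n hs k (prev + 1) := by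
  cases hs with
  | nil =>
    simp only [pvRuns]
    have : (n - prev).toNat = ((n - (prev + 1)).toNat) + 1 := by omega
    simp [this, List.replicate_succ]
  | cons h hs' =>
    have hh : prev + 1 ≤ h := hlb h (List.mem_cons_self ..)
    simp only [pvRuns]
    have : (h - prev).toNat = ((h - (prev + 1)).toNat) + 1 := by omega
    simp [this, List.replicate_succ]

theorem pvListZ_eq_runs (l : List (String × Int)) : ∀ (s z i : Int),
    pvListZ s z l = pvRuns (i + l.length) (pvHits s i l) z i := by
  induction l with
  | nil => intro s z i; simp [pvListZ, pvHits, pvRuns]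
  | cons p rest ih =>
    intro s z i
    obtain ⟨d, a⟩ := p
    have hn : i + (((rest.length : Int)) + 1) = (i + 1) + rest.length := by ring
    by_cases hc : PySem.Int.mod (s + (if d == "L" then -a else if d == "R" then a else 0)) 100 == 0
    · simp only [pvListZ, pvHits, hc, reduceIte, pvRuns, List.length_cons]
      rw [show ((i : Int) - i).toNat = 0 by omega]
      simp only [List.replicate, List.nil_append]
      congr 1
      push_cast
      rw [hn]
      exact ih _ _ _
    · simp only [pvListZ, pvHits, hc, Bool.false_eq_true, if_false, List.length_cons]
      rw [pvRuns_shift _ _ _ _ (fun h hh => pvHits_lb _ _ _ _ hh) (by push_cast; omega)]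
      congr 1
      push_cast
      rw [hn]
      exact ih _ _ _

-- ===== VERDICT (by name: the statement is the Claim_ definition above) =====
theorem gen_expected_outputs_p1_spec : Claim_equal_gen_expected_outputs_p1 := by
  intro stimuli _
  unfold Spec_gen_expected_outputs_p1 gen_expected_outputs_p1 gen_expected_outputs_p1_alt
  have hA : (stimuli.foldl pvStepA ([], 50, 0)).1 = pvListZ 50 0 stimuli := by
    have h := pvFoldA_eq stimuli [] 50 0
    rw [show PySem.Int.mod 50 100 = 50 from by decide] at h
    simpa using h
  rw [hA, pvListZ_eq_runs stimuli 50 0 0, zero_add]
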